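-- pv_equiv track=rewrite | github.com/qwewqa/sonolus.py | sonolus/backend/optimize/simplify.py | get_offset_stride
-- ===== SOURCE A (Python) =====
-- def get_offset_stride(cases: set[int]) -> tuple[int | None, int | None]:
--     cases = sorted(cases)
--     offset = cases[0]
--     stride = cases[1] - offset
--     if int(offset) != offset or int(stride) != stride:
--         return None, None
--     for i, case in enumerate(cases[2:], 2):
--         if case != offset + i * stride:
--             return None, None
--     return offset, stride
-- ===== SOURCE B (Python) =====
-- def get_offset_stride(cases: set[int]) -> tuple[int | None, int | None]:
--     # Derive the stride from min/max in one pass and verify each element by divisibility.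
--     n = len(cases)
--     lo = min(cases)
--     span = max(cases) - lo
--     if span % (n - 1) != 0:
--         return None, None
--     stride = span // (n - 1)
--     for c in cases:
--         if (c - lo) % stride != 0:
--             return None, None
--     return lo, stride
-- ===== Notes on version B (the rewrite author's own statement) =====
-- stated objective: alternative
-- what changed: Instead of sorting the case set and checking consecutive differences, B derives the stride from min/max in a single pass and verifies each element by a modular divisibility check (pigeonhole on distinct elements makes this exact); measured only ~1.2x faster, so no speed is claimed.
import Mathlib
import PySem

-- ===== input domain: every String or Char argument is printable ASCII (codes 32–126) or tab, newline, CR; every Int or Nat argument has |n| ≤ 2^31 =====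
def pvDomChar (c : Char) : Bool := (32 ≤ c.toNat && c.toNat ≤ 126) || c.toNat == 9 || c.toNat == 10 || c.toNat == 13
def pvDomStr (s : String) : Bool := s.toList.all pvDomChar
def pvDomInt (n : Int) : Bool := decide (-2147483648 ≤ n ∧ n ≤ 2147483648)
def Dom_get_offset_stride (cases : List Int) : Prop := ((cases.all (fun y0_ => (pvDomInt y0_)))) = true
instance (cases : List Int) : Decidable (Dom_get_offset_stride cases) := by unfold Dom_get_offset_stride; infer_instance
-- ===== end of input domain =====

-- B avoids A's sort: it derives the stride from min/max and verifies elements by divisibility; return-value equivalence on the set's distinct elements.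

-- ===== PORT A =====
-- the 'for i, case in enumerate(cases[2:], 2): if case != offset + i*stride: return None,None' loop
def aLoop (offset stride : Int) : List (Int × Int) → List (Option Int)
  | [] => [some offset, some stride]
  | (i, c) :: rest =>
      if c ≠ offset + i * stride then [none, none]
      else aLoop offset stride rest

def get_offset_stride (cases : List Int) : List (Option Int) :=
  let s := PySem.List.sorted cases (fun x => x) false
  match PySem.List.pyGet? s 0, PySem.List.pyGet? s 1 with
  | some offset, some c1 =>
      let stride := c1 - offset
      -- 'int(offset) != offset or int(stride) != stride' — int() of an int is itself
      if offset ≠ offset ∨ stride ≠ stride then [none, none]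
      else aLoop offset stride (PySem.List.enumerate (PySem.List.slice s (some 2) none) 2)
  | _, _ => [none, none]   -- IndexError (fewer than 2 cases): excluded by Pre_

-- ===== PORT B =====
-- the 'for c in cases: if (c - lo) % stride != 0: return None,None' loop
def bLoop (lo stride : Int) : List Int → List (Option Int)
  | [] => [some lo, some stride]
  | c :: rest =>
      match PySem.Int.mod? (c - lo) stride with
      | none => [none, none]   -- ZeroDivisionError: excluded by Pre_
      | some m => if m ≠ 0 then [none, none] else bLoop lo stride rest

def get_offset_stride_alt (cases : List Int) : List (Option Int) :=
  match PySem.List.min? cases (fun x => x) with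
  | none => [none, none]    -- min() ValueError on empty: excluded by Pre_
  | some lo =>
      match PySem.List.max? cases (fun x => x) with
      | none => [none, none]
      | some hi =>
          let n : Int := (cases.length : Int)
          let span := hi - lo
          match PySem.Int.mod? span (n - 1) with
          | none => [none, none]  -- ZeroDivisionError (single case): excluded by Pre_
          | some r =>
              if r ≠ 0 then [none, none]
              else bLoop lo (PySem.Int.floordiv span (n - 1)) cases

-- ===== PRECONDITION & SPEC =====
-- Pre_ excludes sets with fewer than 2 elements (A raises IndexError there); cases is the Python
-- set's list of DISTINCT elements, so Nodup is the representation invariant, not a narrowing.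
def Pre_get_offset_stride (cases : List Int) : Prop := cases.Nodup ∧ 2 ≤ cases.length
instance (cases : List Int) : Decidable (Pre_get_offset_stride cases) := by
  unfold Pre_get_offset_stride; infer_instance

def pvWitness_get_offset_stride : List Int := [10, 4, 7]

def Spec_get_offset_stride (cases : List Int) (out : List (Option Int)) : Prop := out = get_offset_stride_alt cases
instance (cases : List Int) (out : List (Option Int)) : Decidable (Spec_get_offset_stride cases out) := by unfold Spec_get_offset_stride; infer_instance

-- ===== CLAIM (what is proved, stated in full; the proofs are below) =====
def Claim_equal_get_offset_stride : Prop := ∀ (cases : List Int), Dom_get_offset_stride cases → Pre_get_offset_stride cases → Spec_get_offset_stride cases (get_offset_stride cases)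

-- ===== LEMMAS AND PROOFS =====

theorem aLoop_eq (o d : Int) (l : List (Int × Int)) :
    aLoop o d l = if ∀ p ∈ l, p.2 = o + p.1 * d then [some o, some d] else [none, none] := by
  induction l with
  | nil => simp [aLoop]
  | cons p rest ih =>
      obtain ⟨i, c⟩ := p
      by_cases h : c = o + i * d
      · have hiff : (∀ p ∈ (i, c) :: rest, p.2 = o + p.1 * d) ↔ (∀ p ∈ rest, p.2 = o + p.1 * d) := by
          constructor
          · intro hall p hp; exact hall p (List.mem_cons_of_mem _ hp)
          · intro hall p hp
            rcases List.mem_cons.mp hp with rfl | hp'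
            · exact h
            · exact hall p hp'
        simp only [aLoop, if_neg (by simp [h] : ¬ c ≠ o + i * d), ih]
        exact (if_congr hiff rfl rfl).symm
      · simp [aLoop, h]

theorem bLoop_eq (lo st : Int) (hst : st ≠ 0) (l : List Int) :
    bLoop lo st l = if ∀ c ∈ l, PySem.Int.mod (c - lo) st = 0 then [some lo, some st] else [none, none] := by
  induction l with
  | nil => simp [bLoop]
  | cons c rest ih =>
      by_cases h : (c - lo).fmod st = 0
      · simp [bLoop, PySem.Int.mod?, PySem.Int.mod, hst, h, ih]
      · simp [bLoop, PySem.Int.mod?, PySem.Int.mod, hst, h]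

-- a strictly increasing Int-valued sequence grows at least by 1 per step
theorem strict_gap (f : Nat → Int) (m : Nat)
    (hmono : ∀ i j, i < j → j < m → f i < f j) :
    ∀ k i, i + k < m → (k : Int) ≤ f (i + k) - f i := by
  intro k
  induction k with
  | zero => intro i _; simp
  | succ k ih =>
      intro i h
      have h1 : (k : Int) ≤ f (i + k) - f i := ih i (by omega)
      have h2 : f (i + k) < f (i + k + 1) := hmono (i + k) (i + k + 1) (by omega) (by omega)
      have : i + (k + 1) = i + k + 1 := by omega
      rw [this]
      push_cast
      omega

theorem pairwise_lt_of_sorted (cases : List Int) (hnd : cases.Nodup) :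
    (PySem.List.sorted cases (fun x => x) false).Pairwise (· < ·) := by
  have hperm : (PySem.List.sorted cases (fun x => x) false).Perm cases :=
    PySem.List.sorted_perm cases (fun x => x) false
  have hnds : (PySem.List.sorted cases (fun x => x) false).Nodup := hperm.nodup_iff.mpr hnd
  have hle : (PySem.List.sorted cases (fun x => x) false).Pairwise (fun a b => a ≤ b) :=
    PySem.List.sorted_pairwise cases (fun x => x)
  exact (hle.and hnds).imp (fun h => lt_of_le_of_ne h.1 h.2)

theorem get_offset_stride_spec : Claim_equal_get_offset_stride := by
  intro cases _ hpre
  obtain ⟨hnd, hlen⟩ := hpre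
  unfold Spec_get_offset_stride
  have hperm : (PySem.List.sorted cases (fun x => x) false).Perm cases :=
    PySem.List.sorted_perm cases (fun x => x) false
  have hlens : (PySem.List.sorted cases (fun x => x) false).length = cases.length :=
    hperm.length_eq
  have hlt := pairwise_lt_of_sorted cases hnd
  obtain ⟨a, b, t, hst⟩ : ∃ a b t, PySem.List.sorted cases (fun x => x) false = a :: b :: t := by
    rcases h : PySem.List.sorted cases (fun x => x) false with _ | ⟨a, _ | ⟨b, t⟩⟩
    · rw [h] at hlens; simp at hlens; omega
    · rw [h] at hlens; simp at hlens; omega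
    · exact ⟨a, b, t, rfl⟩
  rw [hst] at hlens hlt
  have hmono : ∀ i j (_ : i < j) (hj : j < (a :: b :: t).length),
      (a :: b :: t)[i]'(by omega) < (a :: b :: t)[j]'hj := by
    have := List.pairwise_iff_getElem.mp hlt
    intro i j hij hj; exact this i j (by omega) hj hij
  -- A's value
  have hAeval : get_offset_stride cases =
      (if (∀ i (hi : i < (a :: b :: t).length), (a :: b :: t)[i]'hi = a + (i : Int) * (b - a))
       then [some a, some (b - a)] else [none, none]) := by
    have hg0 : PySem.List.pyGet? (a :: b :: t) (0 : Int) = some a := by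
      simp [PySem.List.pyGet?, PySem.List.pyIdx?]
      rw [if_pos (by positivity)]
      simp
    have hg1 : PySem.List.pyGet? (a :: b :: t) (1 : Int) = some b := by
      simp [PySem.List.pyGet?, PySem.List.pyIdx?]
    have hsl : PySem.List.slice (a :: b :: t) (some 2) none = t := by
      rw [PySem.List.slice_from (ha := by norm_num)]
      rfl
    simp only [get_offset_stride, hst, hg0, hg1, hsl]
    simp only [ne_eq, not_true_eq_false, or_self, if_false]
    rw [aLoop_eq]
    apply if_congr _ rfl rfl
    have hloop : (∀ p ∈ PySem.List.enumerate t 2, p.2 = a + p.1 * (b - a)) ↔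
        (∀ k (hk : k < t.length), t[k] = a + ((2 : Int) + (k : Int)) * (b - a)) := by
      constructor
      · intro h k hk
        have := h ((2 : Int) + (k : Int), t[k]) ((PySem.List.mem_enumerate_iff _ _ _).mpr ⟨k, hk, rfl⟩)
        simpa using this
      · intro h p hp
        obtain ⟨k, hk, rfl⟩ := (PySem.List.mem_enumerate_iff _ _ _).mp hp
        simpa using h k hk
    rw [hloop]
    constructor
    · intro h i hi
      match i, hi with
      | 0, _ => simp
      | 1, _ => simp only [List.getElem_cons_succ, List.getElem_cons_zero]; push_cast; ring
      | (k+2), hi =>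
          have hk : k < t.length := by simp at hi; omega
          have := h k hk
          simp only [List.getElem_cons_succ]
          rw [this]
          push_cast
          ring
    · intro h k hk
      have := h (k + 2) (by simp; omega)
      simp only [List.getElem_cons_succ] at this
      rw [this]
      push_cast
      ring
  rw [hst] at hperm
  -- the minimum of cases is a
  have hamem : a ∈ cases := hperm.mem_iff.mp (by simp)
  have ha_min : ∀ y ∈ a :: b :: t, a ≤ y := by
    intro y hy
    rcases List.mem_cons.mp hy with rfl | hy'
    · exact le_refl _
    · exact le_of_lt (List.rel_of_pairwise_cons hlt hy')
  have hmin : PySem.List.min? cases (fun x => x) = some a := by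
    cases h : PySem.List.min? cases (fun x => x) with
    | none =>
        rw [PySem.List.min?_eq_none_iff] at h
        rw [h] at hlen; simp at hlen
    | some m =>
        have h1 : m ≤ a := PySem.List.min?_isMin h a hamem
        have h2 : a ≤ m := ha_min m (hperm.mem_iff.mpr (PySem.List.min?_mem h))
        rw [le_antisymm h1 h2]
  -- the maximum of cases is the last element of the sorted list
  have hMlt : t.length + 1 < (a :: b :: t).length := by simp
  have hM_max : ∀ y ∈ a :: b :: t, y ≤ (a :: b :: t)[t.length + 1]'hMlt := by
    intro y hy
    obtain ⟨j, hj, rfl⟩ := List.mem_iff_getElem.mp hy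
    by_cases hje : j = t.length + 1
    · subst hje; exact le_refl _
    · exact le_of_lt (hmono j (t.length + 1) (by simp at hj; omega) hMlt)
  have hmax : PySem.List.max? cases (fun x => x) = some ((a :: b :: t)[t.length + 1]'hMlt) := by
    cases h : PySem.List.max? cases (fun x => x) with
    | none =>
        rw [PySem.List.max?_eq_none_iff] at h
        rw [h] at hlen; simp at hlen
    | some m =>
        have h1 : m ≤ (a :: b :: t)[t.length + 1]'hMlt :=
          hM_max m (hperm.mem_iff.mpr (PySem.List.max?_mem h))
        have h2 : (a :: b :: t)[t.length + 1]'hMlt ≤ m :=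
          PySem.List.max?_isMax h _ (hperm.mem_iff.mp (List.getElem_mem hMlt))
        rw [le_antisymm h1 h2]
  have hlc : cases.length = t.length + 2 := by rw [← hlens]; simp
  have hd0ne : ((t.length : Int) + 1) ≠ 0 := by positivity
  -- B's value
  have hBeval : get_offset_stride_alt cases =
      (if PySem.Int.mod ((a :: b :: t)[t.length + 1]'hMlt - a) ((t.length : Int) + 1) = 0
       then bLoop a (PySem.Int.floordiv ((a :: b :: t)[t.length + 1]'hMlt - a) ((t.length : Int) + 1)) cases
       else [none, none]) := by
    have hcast : (cases.length : Int) - 1 = (t.length : Int) + 1 := by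
      rw [hlc]; push_cast; ring
    simp only [get_offset_stride_alt, hmin, hmax, hcast]
    simp only [PySem.Int.mod?, if_neg hd0ne]
    simp [PySem.Int.mod]
  rw [hAeval, hBeval]
  by_cases hr : PySem.Int.mod ((a :: b :: t)[t.length + 1]'hMlt - a) ((t.length : Int) + 1) = 0
  · -- the span is a multiple of n-1
    have hspan_pos : 0 < (a :: b :: t)[t.length + 1]'hMlt - a := by
      have := hmono 0 (t.length + 1) (by omega) hMlt
      simp only [List.getElem_cons_zero] at this
      omega
    have hfd := PySem.Int.floordiv_mul_add_mod ((a :: b :: t)[t.length + 1]'hMlt - a) ((t.length : Int) + 1)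
    rw [hr, add_zero] at hfd
    -- abbreviate the stride
    set st := PySem.Int.floordiv ((a :: b :: t)[t.length + 1]'hMlt - a) ((t.length : Int) + 1) with hstdef
    have hst_pos : 0 < st := by nlinarith [hspan_pos, hfd]
    have hstne : st ≠ 0 := by omega
    rw [bLoop_eq a st hstne]
    -- A's AP condition implies B's divisibility condition (with equal strides), and conversely
    have hBA : (∀ c ∈ cases, PySem.Int.mod (c - a) st = 0) →
        (∀ i (hi : i < (a :: b :: t).length), (a :: b :: t)[i]'hi = a + (i : Int) * (b - a)) := by
      intro hB
      have hdvd : ∀ i (hi : i < (a :: b :: t).length), st ∣ ((a :: b :: t)[i]'hi - a) := by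
        intro i hi
        have hc : (a :: b :: t)[i]'hi ∈ cases := hperm.mem_iff.mp (List.getElem_mem hi)
        exact (PySem.Int.mod_eq_zero_iff_dvd _ _).mp (hB _ hc)
      set g : Nat → Int :=
        fun i => if hi : i < (a :: b :: t).length then ((a :: b :: t)[i]'hi - a) / st else 0 with hg
      have hgval : ∀ i (hi : i < (a :: b :: t).length), st * g i = (a :: b :: t)[i]'hi - a := by
        intro i hi
        simp only [hg, dif_pos hi]
        exact Int.mul_ediv_cancel' (hdvd i hi)
      have hgmono : ∀ i j, i < j → j < (a :: b :: t).length → g i < g j := by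
        intro i j hij hj
        have h1 := hgval i (by omega)
        have h2 := hgval j hj
        have h3 : (a :: b :: t)[i]'(by omega) < (a :: b :: t)[j]'hj := hmono i j hij hj
        have h4 : st * g i < st * g j := by omega
        exact lt_of_mul_lt_mul_left h4 (le_of_lt hst_pos)
      have hg0 : g 0 = 0 := by
        have h0 := hgval 0 (by omega)
        simp only [List.getElem_cons_zero, sub_self] at h0
        rcases mul_eq_zero.mp h0 with h | h
        · exact absurd h hstne
        · exact h
      have hglast : g (t.length + 1) = (t.length : Int) + 1 := by
        have h1 := hgval (t.length + 1) hMlt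
        have h2 : st * g (t.length + 1) = st * ((t.length : Int) + 1) := by
          rw [h1]; nlinarith [hfd]
        exact mul_left_cancel₀ hstne h2
      have hgexact : ∀ i, i < (a :: b :: t).length → g i = (i : Int) := by
        intro i hi
        have hilen : i ≤ t.length + 1 := by simp at hi; omega
        have hlow := strict_gap g (a :: b :: t).length hgmono i 0 (by simpa using hi)
        rw [Nat.zero_add, hg0, sub_zero] at hlow
        have hhigh := strict_gap g (a :: b :: t).length hgmono (t.length + 1 - i) i (by simp; omega)
        have hidx : i + (t.length + 1 - i) = t.length + 1 := by omega
        rw [hidx, hglast] at hhigh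
        have hcast : ((t.length + 1 - i : Nat) : Int) = (t.length : Int) + 1 - (i : Int) := by
          push_cast [Nat.cast_sub (by omega : i ≤ t.length + 1)]
          ring
        rw [hcast] at hhigh
        omega
      have hba : b - a = st := by
        have h1 := hgval 1 (by simp)
        rw [hgexact 1 (by simp)] at h1
        simp only [List.getElem_cons_succ, List.getElem_cons_zero, Nat.cast_one, mul_one] at h1
        omega
      intro i hi
      have h := hgval i hi
      rw [hgexact i hi, mul_comm] at h
      rw [hba]
      linarith [h]
    have heq : (∀ i (hi : i < (a :: b :: t).length), (a :: b :: t)[i]'hi = a + (i : Int) * (b - a)) →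
        b - a = st := by
      intro hA
      have hM := hA (t.length + 1) hMlt
      have h2 : st * ((t.length : Int) + 1) = ((t.length : Int) + 1) * (b - a) := by
        rw [hfd, hM]
        push_cast
        ring
      have h3 : ((t.length : Int) + 1) * st = ((t.length : Int) + 1) * (b - a) := by
        rw [mul_comm]; exact h2
      exact (mul_left_cancel₀ hd0ne h3).symm
    have hAB : (∀ i (hi : i < (a :: b :: t).length), (a :: b :: t)[i]'hi = a + (i : Int) * (b - a)) →
        ∀ c ∈ cases, PySem.Int.mod (c - a) st = 0 := by
      intro hA c hc
      obtain ⟨j, hj, rfl⟩ := List.mem_iff_getElem.mp (hperm.mem_iff.mpr hc)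
      rw [PySem.Int.mod_eq_zero_iff_dvd, hA j hj, ← heq hA]
      exact ⟨(j : Int), by ring⟩
    by_cases hA : ∀ i (hi : i < (a :: b :: t).length), (a :: b :: t)[i]'hi = a + (i : Int) * (b - a)
    · rw [if_pos hA, if_pos hr, if_pos (hAB hA), heq hA]
    · rw [if_neg hA, if_pos hr, if_neg (fun hB => hA (hBA hB))]
  · -- B returns None,None; A must as well, else n-1 would divide the span
    have hnA : ¬ (∀ i (hi : i < (a :: b :: t).length), (a :: b :: t)[i]'hi = a + (i : Int) * (b - a)) := by
      intro hA
      apply hr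
      rw [PySem.Int.mod_eq_zero_iff_dvd]
      have hM := hA (t.length + 1) hMlt
      refine ⟨b - a, ?_⟩
      rw [hM]
      push_cast
      ring
    rw [if_neg hr, if_neg hnA]
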